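-- pv_equiv track=rewrite | github.com/tberhanu/all_trainings | 10_training/17***_letter_comb_phone.py | foo
-- ===== SOURCE A (Python) =====
-- def foo(arr, all, index, string):
--     if len(string) == len(arr):
--         all.append(string)
--
--     i = 0
--     while index < len(arr) and i < len(arr[index]):
--         foo(arr, all, index + 1, string + arr[index][i])
--         i = i + 1
--
--     return all
-- ===== SOURCE B (Python) =====
-- def foo(arr, all, index, string):
--     # Iterative layered cartesian product instead of recursive DFS (return value and
--     # in-place appends to `all` match A's).
--     n = len(arr) - len(string)
--     if n < 0:
--         return all
--     if n == 0:
--         all.append(string)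
--         return all
--     if index + n > len(arr):
--         return all
--     combos = [string]
--     for group in arr[index:index + n]:
--         combos = [c + ch for c in combos for ch in group]
--     all.extend(combos)
--     return all
-- ===== Notes on version B (the rewrite author's own statement) =====
-- stated objective: alternative
-- what changed: Replaced the recursive DFS (which explores the full product tree of every group from index onward even when no further word can match the target length) by a direct iterative layered cartesian product over only the n = len(arr)-len(string) groups arr[index:index+n], with early returns for n<0, n==0 and index+n>len(arr).
-- outside the precondition, e.g. on foo(['ab', 'cd'], [], -2, ''): A returns ['ac', 'ad', 'bc', 'bd'], B returns ['']; on foo(['ab'], [], -3, 'x'): A raises IndexError, B returns ['x']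
import Mathlib
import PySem

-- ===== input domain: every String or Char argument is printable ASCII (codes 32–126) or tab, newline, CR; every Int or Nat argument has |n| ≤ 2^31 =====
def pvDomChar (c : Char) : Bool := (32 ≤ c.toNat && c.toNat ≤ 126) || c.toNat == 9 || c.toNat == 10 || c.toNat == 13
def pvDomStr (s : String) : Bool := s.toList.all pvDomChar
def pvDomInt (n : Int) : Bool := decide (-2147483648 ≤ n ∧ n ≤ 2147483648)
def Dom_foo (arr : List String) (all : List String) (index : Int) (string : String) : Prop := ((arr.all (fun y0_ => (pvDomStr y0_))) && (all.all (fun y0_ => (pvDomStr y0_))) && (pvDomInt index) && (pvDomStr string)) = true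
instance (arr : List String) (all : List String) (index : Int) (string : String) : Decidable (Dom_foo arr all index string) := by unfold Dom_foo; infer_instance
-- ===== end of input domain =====

-- B replaces A's recursive DFS by a direct iterative layered cartesian product (alternative
-- decomposition, same cost).  A mutates `all` in place; B performs the same appends, and the
-- equivalence proved here is about the returned list.

-- ===== PORT A =====
-- A's recursive DFS: append `string` when its length matches, then loop i over the characters
-- of arr[index] (while index < len(arr)) recursing with index+1 and string + arr[index][i].
def foo (arr : List String) (all : List String) (index : Int) (string : String) : List String :=
  let all1 := if PySem.Str.len string = PySem.List.len arr then all ++ [string] else all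
  if h : index < PySem.List.len arr then
    match PySem.List.pyGet? arr index with
    | none => all1  -- Python raises IndexError here (index < -len(arr)); outside Pre_foo
    | some g =>
      g.toList.foldl
        (fun acc c => foo arr acc (index + 1) (String.ofList (string.toList ++ [c]))) all1
  else all1
termination_by ((PySem.List.len arr) - index).toNat
decreasing_by simp [PySem.List.len] at h ⊢; omega

-- ===== PORT B =====
def foo_alt (arr : List String) (all : List String) (index : Int) (string : String) : List String :=
  let n : Int := PySem.List.len arr - PySem.Str.len string
  if n < 0 then all
  else if n = 0 then all ++ [string]
  else if index + n > PySem.List.len arr then all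
  else
    let groups := PySem.List.slice arr (some index) (some (index + n))
    let combos := groups.foldl
      (fun cs g => cs.flatMap (fun c => g.toList.map (fun ch => String.ofList (c.toList ++ [ch]))))
      [string]
    all ++ combos

-- ===== PRECONDITION & SPEC =====
-- Pre_foo excludes negative index: there A either raises IndexError (index < -len(arr), or a
-- negative index into an empty arr) or returns words assembled through Python's accidental
-- negative-index wraparound — a corner of this DFS helper no caller reaches (calls start at index 0).
def Pre_foo (arr : List String) (all : List String) (index : Int) (string : String) : Prop := 0 ≤ index
instance (arr : List String) (all : List String) (index : Int) (string : String) : Decidable (Pre_foo arr all index string) := by unfold Pre_foo; infer_instance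
def pvWitness_foo : List String × List String × Int × String := (["ab", "c"], ["seed"], 0, "")

def Spec_foo (arr : List String) (all : List String) (index : Int) (string : String) (out : List String) : Prop := out = foo_alt arr all index string
instance (arr : List String) (all : List String) (index : Int) (string : String) (out : List String) : Decidable (Spec_foo arr all index string out) := by unfold Spec_foo; infer_instance

-- ===== CLAIM (what is proved, stated in full; the proofs are below) =====
def Claim_equal_foo : Prop := ∀ (arr : List String) (all : List String) (index : Int) (string : String), Dom_foo arr all index string → Pre_foo arr all index string → Spec_foo arr all index string (foo arr all index string)

-- ===== LEMMAS AND PROOFS =====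

-- The list of words A's call appends to `all`, as a pure function (index as a Nat: Pre_ gives 0 ≤ index).
def gen (arr : List String) (index : Nat) (s : List Char) : List String :=
  (if s.length = arr.length then [String.ofList s] else []) ++
  (if h : index < arr.length then
     (arr[index]).toList.flatMap (fun c => gen arr (index + 1) (s ++ [c]))
   else [])
termination_by arr.length - index

-- The depth-first product of a list of groups, prefixed by s (B's combos, recursively).
def prodR : List String → List Char → List String
  | [], s => [String.ofList s]
  | g :: gs, s => g.toList.flatMap (fun c => prodR gs (s ++ [c]))

theorem foo_eq_gen (arr : List String) (all : List String) (index : Int) (string : String)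
    (hidx : 0 ≤ index) :
    foo arr all index string = all ++ gen arr index.toNat string.toList := by
  rw [foo]
  have hlen : PySem.List.len arr = (arr.length : Int) := by simp [PySem.List.len]
  have hslen : PySem.Str.len string = (string.toList.length : Int) := PySem.Str.len_eq string
  rw [gen]
  by_cases h : index < (arr.length : Int)
  · have hnat : index.toNat < arr.length := by omega
    rw [dif_pos (by rw [hlen]; exact h), dif_pos hnat]
    rw [PySem.List.pyGet?_eq_some_getElem arr hidx (by exact_mod_cast h)]
    dsimp only
    have hstep : ∀ (acc : List String), ∀ c ∈ (arr[index.toNat]).toList,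
        foo arr acc (index + 1) (String.ofList (string.toList ++ [c])) =
        acc ++ gen arr (index.toNat + 1) (string.toList ++ [c]) := by
      intro acc c _
      have := foo_eq_gen arr acc (index + 1) (String.ofList (string.toList ++ [c])) (by omega)
      rw [this, String.toList_ofList]
      congr 2
      omega
    rw [PySem.List.foldl_congr_mem _ _ _ _ hstep,
        PySem.List.foldl_append_eq_flatMap]
    simp only [hlen, hslen]
    by_cases hl : string.toList.length = arr.length
    · rw [if_pos (by exact_mod_cast hl), if_pos hl]; simp
    · rw [if_neg (by exact_mod_cast fun hc => hl (by exact_mod_cast hc)), if_neg hl]; simp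
  · rw [dif_neg (by rw [hlen]; exact h), dif_neg (by omega)]
    simp only [hlen, hslen]
    by_cases hl : string.toList.length = arr.length
    · rw [if_pos (by exact_mod_cast hl), if_pos hl]; simp
    · rw [if_neg (by exact_mod_cast fun hc => hl (by exact_mod_cast hc)), if_neg hl]; simp
termination_by ((arr.length : Int) - index).toNat
decreasing_by omega

theorem gen_long (arr : List String) (index : Nat) (s : List Char)
    (h : arr.length < s.length) : gen arr index s = [] := by
  rw [gen, if_neg (by omega)]
  by_cases hi : index < arr.length
  · rw [dif_pos hi]
    simp only [List.nil_append]
    apply List.flatMap_eq_nil_iff.mpr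
    intro c _
    exact gen_long arr (index + 1) (s ++ [c]) (by simp; omega)
  · rw [dif_neg hi]; simp
termination_by arr.length - index

theorem gen_char (arr : List String) (n : Nat) :
    ∀ (index : Nat) (s : List Char), arr.length = s.length + n →
    gen arr index s =
      if n = 0 ∨ index + n ≤ arr.length then prodR ((arr.drop index).take n) s else [] := by
  induction n with
  | zero =>
    intro index s hn
    rw [if_pos (Or.inl rfl), gen, if_pos (by omega)]
    simp only [List.take_zero, prodR]
    by_cases hi : index < arr.length
    · rw [dif_pos hi]
      have : ∀ c ∈ (arr[index]).toList, gen arr (index + 1) (s ++ [c]) = [] := by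
        intro c _; exact gen_long arr (index + 1) (s ++ [c]) (by simp; omega)
      simp [List.flatMap_eq_nil_iff.mpr this]
    · rw [dif_neg hi]; simp
  | succ m ih =>
    intro index s hn
    rw [gen, if_neg (by omega)]
    by_cases hi : index < arr.length
    · rw [dif_pos hi]
      have hrec : ∀ c ∈ (arr[index]).toList,
          gen arr (index + 1) (s ++ [c]) =
            if m = 0 ∨ index + 1 + m ≤ arr.length
            then prodR ((arr.drop (index + 1)).take m) (s ++ [c]) else [] := by
        intro c _; exact ih (index + 1) (s ++ [c]) (by simp; omega)
      by_cases hc : index + (m + 1) ≤ arr.length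
      · rw [if_pos (Or.inr hc)]
        have hdrop : (arr.drop index).take (m + 1) =
            arr[index] :: (arr.drop (index + 1)).take m := by
          rw [List.drop_eq_getElem_cons hi, List.take_succ_cons]
        rw [hdrop]
        simp only [prodR, List.nil_append]
        apply List.flatMap_congr  -- pointwise rewrite of the inner gen's
        intro c hcmem
        rw [hrec c hcmem]
        by_cases hm : m = 0
        · rw [if_pos (Or.inl hm)]
        · rw [if_pos (Or.inr (by omega))]
      · rw [if_neg (by omega)]
        simp only [List.nil_append]
        apply List.flatMap_eq_nil_iff.mpr
        intro c hcmem
        rw [hrec c hcmem, if_neg (by omega)]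
    · rw [dif_neg hi, if_neg (by omega)]
      simp

theorem fold_layers (gs : List String) :
    ∀ (cs : List String),
    gs.foldl (fun cs g => cs.flatMap (fun c => g.toList.map (fun ch => String.ofList (c.toList ++ [ch])))) cs
      = cs.flatMap (fun c => prodR gs c.toList) := by
  induction gs with
  | nil =>
    intro cs
    simp only [List.foldl_nil, prodR]
    have : (fun c : String => [String.ofList c.toList]) = fun c => [c] := by
      funext c; rw [String.ofList_toList]
    rw [this, List.flatMap_singleton']
  | cons g gs ih =>
    intro cs
    simp only [List.foldl_cons]
    rw [ih, List.flatMap_assoc]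
    apply List.flatMap_congr
    intro c _
    rw [List.flatMap_map]
    simp only [prodR]
    apply List.flatMap_congr
    intro ch _
    rw [String.toList_ofList]

-- ===== VERDICT (by name: the statement is the Claim_ definition above) =====
theorem foo_spec : Claim_equal_foo := by
  intro arr all index string _ hpre
  unfold Spec_foo foo_alt
  have hidx : 0 ≤ index := hpre
  have hlen : PySem.List.len arr = (arr.length : Int) := by simp [PySem.List.len]
  have hslen : PySem.Str.len string = (string.toList.length : Int) := PySem.Str.len_eq string
  rw [foo_eq_gen arr all index string hidx]
  simp only [hlen, hslen]
  by_cases hneg : (arr.length : Int) - (string.toList.length : Int) < 0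
  · rw [if_pos hneg]
    rw [gen_long arr index.toNat string.toList (by omega)]
    simp
  · rw [if_neg hneg]
    set N : Nat := arr.length - string.toList.length with hN
    have hNn : arr.length = string.toList.length + N := by omega
    by_cases hz : (arr.length : Int) - (string.toList.length : Int) = 0
    · rw [if_pos hz]
      rw [gen_char arr N index.toNat string.toList hNn, if_pos (Or.inl (by omega))]
      have : N = 0 := by omega
      rw [this]
      simp [prodR, String.ofList_toList]
    · rw [if_neg hz]
      have hNpos : 0 < N := by omega
      by_cases hover : index + ((arr.length : Int) - (string.toList.length : Int)) > (arr.length : Int)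
      · rw [if_pos hover]
        rw [gen_char arr N index.toNat string.toList hNn, if_neg (by omega)]
        simp
      · rw [if_neg hover]
        rw [gen_char arr N index.toNat string.toList hNn, if_pos (Or.inr (by omega))]
        rw [PySem.List.slice_toNat arr hidx (by omega)]
        have harg : ((index + ((arr.length : Int) - (string.toList.length : Int))).toNat - index.toNat) = N := by omega
        rw [harg, fold_layers]
        simp
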